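-- pv_equiv track=rewrite | github.com/aengus-signal4/signal4-core | src/processing_steps/stitch_steps/stage2_clean.py | _remove_excessive_word_repetition
-- ===== SOURCE A (Python) =====
-- from typing import Dict, Any, List, Set, Tuple
--
-- def _remove_excessive_word_repetition(words: List[str], max_repetition: int) -> List[str]:
--     """
--     Remove excessive consecutive repetition of words.
--
--     For example: "uh uh uh uh uh" -> "uh uh uh" (if max_repetition = 3)
--     """
--     if not words:
--         return words
--
--     cleaned = []
--     current_word = None
--     current_count = 0
--
--     for word in words:
--         word_normalized = word.lower().strip('.,!?;:')  # Normalize for comparison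
--
--         if word_normalized == current_word:
--             current_count += 1
--             if current_count <= max_repetition:
--                 cleaned.append(word)
--             # Skip words beyond max_repetition
--         else:
--             current_word = word_normalized
--             current_count = 1
--             cleaned.append(word)
--
--     return cleaned
-- ===== SOURCE B (Python) =====
-- from typing import List
--
--
-- def _norm(w: str) -> str:
--     return w.lower().strip('.,!?;:')
--
--
-- def _remove_excessive_word_repetition(words: List[str], max_repetition: int) -> List[str]:
--     # Group-then-truncate: find each maximal run of equally-normalized words,
--     # keep its first max(max_repetition, 1) originals.
--     n = max_repetition if max_repetition >= 1 else 1
--     cleaned = []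
--     i = 0
--     while i < len(words):
--         key = _norm(words[i])
--         j = i
--         while j < len(words) and _norm(words[j]) == key:
--             j += 1
--         cleaned += words[i:j][:n]
--         i = j
--     return cleaned
-- ===== Notes on version B (the rewrite author's own statement) =====
-- stated objective: alternative
-- what changed: Replaces A's running (current_word, current_count) state machine by a group-then-truncate decomposition: scan each maximal run of equally-normalized words and keep its first max(max_repetition, 1) original words.
import Mathlib
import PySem

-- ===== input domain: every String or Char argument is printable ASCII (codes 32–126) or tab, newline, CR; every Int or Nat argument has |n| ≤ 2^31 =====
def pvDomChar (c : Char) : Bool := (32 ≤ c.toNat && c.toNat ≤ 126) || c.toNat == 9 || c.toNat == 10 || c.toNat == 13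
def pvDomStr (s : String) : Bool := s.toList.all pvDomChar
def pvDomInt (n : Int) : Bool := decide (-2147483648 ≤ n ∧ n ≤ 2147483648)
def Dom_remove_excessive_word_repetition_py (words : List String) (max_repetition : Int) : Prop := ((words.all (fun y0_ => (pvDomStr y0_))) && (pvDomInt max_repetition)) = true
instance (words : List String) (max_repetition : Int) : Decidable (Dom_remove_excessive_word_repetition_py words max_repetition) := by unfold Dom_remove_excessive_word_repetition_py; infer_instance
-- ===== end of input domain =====

-- B replaces A's running counter state machine by a group-then-truncate decomposition
-- (scan each maximal run of equally-normalized words, keep its first max(max_repetition,1)); objective: alternative.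

-- word.lower().strip('.,!?;:'), shared normalization of both Pythons
def pvNorm (w : String) : String := PySem.Str.stripChars (PySem.Str.lower w) ".,!?;:"

-- ===== PORT A =====
-- the for-loop of A, state (cleaned, current_word, current_count)
def pvAGo (m : Int) (cleaned : List String) (cur : Option String) (cnt : Int) : List String → List String
  | [] => cleaned
  | word :: rest =>
    let wn := pvNorm word
    if some wn = cur then
      if cnt + 1 ≤ m then pvAGo m (cleaned ++ [word]) cur (cnt + 1) rest
      else pvAGo m cleaned cur (cnt + 1) rest
    else pvAGo m (cleaned ++ [word]) (some wn) 1 rest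

def remove_excessive_word_repetition_py (words : List String) (max_repetition : Int) : List String :=
  if words = [] then words
  else pvAGo max_repetition [] none 0 words

-- ===== PORT B =====
-- Source B's outer while loop = recursion on the remaining suffix; the inner while scan
-- for the run end is takeWhile/dropWhile; words[i:j][:n] = run.take n.toNat (n ≥ 1 here).
def pvBGo (n : Int) : List String → List String
  | [] => []
  | w :: rest =>
    ((w :: rest).takeWhile (fun x => pvNorm x == pvNorm w)).take n.toNat
      ++ pvBGo n ((w :: rest).dropWhile (fun x => pvNorm x == pvNorm w))
termination_by l => l.length
decreasing_by
  simp only [List.dropWhile_cons, beq_self_eq_true, if_true, List.length_cons]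
  exact Nat.lt_succ_of_le (List.length_dropWhile_le _ _)

def remove_excessive_word_repetition_py_alt (words : List String) (max_repetition : Int) : List String :=
  let n := if 1 ≤ max_repetition then max_repetition else 1
  pvBGo n words

-- ===== PRECONDITION & SPEC =====
def Spec_remove_excessive_word_repetition_py (words : List String) (max_repetition : Int) (out : List String) : Prop := out = remove_excessive_word_repetition_py_alt words max_repetition
instance (words : List String) (max_repetition : Int) (out : List String) : Decidable (Spec_remove_excessive_word_repetition_py words max_repetition out) := by unfold Spec_remove_excessive_word_repetition_py; infer_instance

-- ===== CLAIM (what is proved, stated in full; the proofs are below) =====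
def Claim_equal_remove_excessive_word_repetition_py : Prop := ∀ (words : List String) (max_repetition : Int), Dom_remove_excessive_word_repetition_py words max_repetition → Spec_remove_excessive_word_repetition_py words max_repetition (remove_excessive_word_repetition_py words max_repetition)

-- ===== LEMMAS AND PROOFS =====

-- dropWhile's first survivor fails the predicate
theorem pvDropWhile_head_false {α : Type} (p : α → Bool) : ∀ (l : List α) (y : α) (t : List α),
    l.dropWhile p = y :: t → p y = false := by
  intro l
  induction l with
  | nil => intro y t h; simp [List.dropWhile] at h
  | cons a l' ih =>
    intro y t h
    rw [List.dropWhile_cons] at h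
    by_cases ha : p a
    · rw [if_pos ha] at h; exact ih y t h
    · rw [if_neg ha] at h
      cases h
      simpa using ha

-- the accumulator factors out of A's loop
theorem pvAGo_acc (m : Int) : ∀ (ws : List String) (cleaned : List String) (cur : Option String) (cnt : Int),
    pvAGo m cleaned cur cnt ws = cleaned ++ pvAGo m [] cur cnt ws := by
  intro ws
  induction ws with
  | nil => intro cleaned cur cnt; simp [pvAGo]
  | cons w rest ih =>
    intro cleaned cur cnt
    simp only [pvAGo]
    split_ifs with h1 h2
    · rw [ih (cleaned ++ [w]), ih ([] ++ [w])]; simp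
    · rw [ih cleaned]
    · rw [ih (cleaned ++ [w]), ih ([] ++ [w])]; simp

-- A's loop across a run of words all normalizing to the current word
theorem pvAGo_run (m : Int) : ∀ (run rest : List String) (k : String) (c : Int),
    (∀ x ∈ run, pvNorm x = k) →
    pvAGo m [] (some k) c (run ++ rest) = run.take (m - c).toNat ++ pvAGo m [] (some k) (c + run.length) rest := by
  intro run
  induction run with
  | nil => intro rest k c _; simp
  | cons x run' ih =>
    intro rest k c hall
    have hx : pvNorm x = k := hall x (by simp)
    simp only [List.cons_append, pvAGo, hx]
    rw [if_pos trivial]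
    have ih' := ih rest k (c + 1) (fun y hy => hall y (by simp [hy]))
    by_cases h : c + 1 ≤ m
    · rw [if_pos h, pvAGo_acc, ih']
      have h1 : (m - c).toNat = (m - (c + 1)).toNat + 1 := by omega
      simp only [h1, List.take_succ_cons, List.length_cons]
      have h2 : c + 1 + (run'.length : Int) = c + ((run'.length : Int) + 1) := by ring
      simp [h2]
    · rw [if_neg h, ih']
      have h1 : (m - c).toNat = 0 := by omega
      have h2 : (m - (c + 1)).toNat = 0 := by omega
      have h3 : c + 1 + (run'.length : Int) = c + ((run'.length : Int) + 1) := by ring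
      simp [h1, h2, h3]

-- a word whose normalization differs from the current one restarts the counter
theorem pvAGo_fresh (m : Int) (cur : Option String) (cnt : Int) (w : String) (rest : List String)
    (h : some (pvNorm w) ≠ cur) :
    pvAGo m [] cur cnt (w :: rest) = w :: pvAGo m [] (some (pvNorm w)) 1 rest := by
  simp only [pvAGo]
  rw [if_neg h, pvAGo_acc]
  simp

theorem pvBGo_nil (n : Int) : pvBGo n [] = [] := by rw [pvBGo]

theorem pvBGo_cons (n : Int) (w : String) (rest : List String) :
    pvBGo n (w :: rest)
      = (w :: rest.takeWhile (fun x => pvNorm x == pvNorm w)).take n.toNat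
        ++ pvBGo n (rest.dropWhile (fun x => pvNorm x == pvNorm w)) := by
  rw [pvBGo]
  simp only [List.takeWhile_cons, List.dropWhile_cons, beq_self_eq_true, if_true]

theorem pvMain (m : Int) : ∀ (N : Nat) (ws : List String), ws.length ≤ N →
    pvAGo m [] none 0 ws = pvBGo (if 1 ≤ m then m else 1) ws := by
  intro N
  induction N with
  | zero =>
    intro ws h
    have hws : ws = [] := List.eq_nil_of_length_eq_zero (Nat.le_zero.mp h)
    subst hws
    simp [pvAGo, pvBGo_nil]
  | succ N ih =>
    intro ws h
    cases ws with
    | nil => simp [pvAGo, pvBGo_nil]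
    | cons w rest =>
      have hn1 : (1 : Int) ≤ if 1 ≤ m then m else 1 := by split_ifs with hm; exact hm; exact le_refl 1
      have hsplit : rest = rest.takeWhile (fun x => pvNorm x == pvNorm w)
          ++ rest.dropWhile (fun x => pvNorm x == pvNorm w) := (List.takeWhile_append_dropWhile).symm
      have hall : ∀ x ∈ rest.takeWhile (fun x => pvNorm x == pvNorm w), pvNorm x = pvNorm w := by
        intro x hx
        simpa using List.mem_takeWhile_imp hx
      have hA : pvAGo m [] none 0 (w :: rest)
          = w :: ((rest.takeWhile (fun x => pvNorm x == pvNorm w)).take (m - 1).toNat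
            ++ pvAGo m [] (some (pvNorm w))
                (1 + (rest.takeWhile (fun x => pvNorm x == pvNorm w)).length)
                (rest.dropWhile (fun x => pvNorm x == pvNorm w))) := by
        rw [pvAGo_fresh m none 0 w rest (by simp)]
        conv_lhs => rw [hsplit]
        rw [pvAGo_run m _ _ (pvNorm w) 1 hall]
      have htoNat : (m - 1).toNat = (if 1 ≤ m then m else 1).toNat - 1 := by
        split_ifs with hm <;> omega
      have htake : (w :: rest.takeWhile (fun x => pvNorm x == pvNorm w)).take
            (if 1 ≤ m then m else 1).toNat
          = w :: (rest.takeWhile (fun x => pvNorm x == pvNorm w)).take (m - 1).toNat := by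
        have h1 : (if 1 ≤ m then m else 1).toNat
            = ((if 1 ≤ m then m else 1).toNat - 1) + 1 := by omega
        rw [h1, List.take_succ_cons, htoNat]
      have hlen : (rest.dropWhile (fun x => pvNorm x == pvNorm w)).length ≤ N := by
        have h1 := List.length_dropWhile_le (fun x => pvNorm x == pvNorm w) rest
        have h2 : rest.length ≤ N := by simpa using Nat.le_of_succ_le_succ h
        omega
      have htail : pvAGo m [] (some (pvNorm w))
            (1 + (rest.takeWhile (fun x => pvNorm x == pvNorm w)).length)
            (rest.dropWhile (fun x => pvNorm x == pvNorm w))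
          = pvBGo (if 1 ≤ m then m else 1) (rest.dropWhile (fun x => pvNorm x == pvNorm w)) := by
        cases hre : rest.dropWhile (fun x => pvNorm x == pvNorm w) with
        | nil => simp [pvAGo, pvBGo_nil]
        | cons y t =>
          have hy := pvDropWhile_head_false (fun x => pvNorm x == pvNorm w) rest y t hre
          have hyne : pvNorm y ≠ pvNorm w := by simpa using hy
          rw [pvAGo_fresh m (some (pvNorm w)) _ y t (by simpa using hyne)]
          rw [← pvAGo_fresh m none 0 y t (by simp)]
          rw [← hre]
          exact ih _ hlen
      rw [hA, pvBGo_cons, htake, htail, List.cons_append]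

-- ===== VERDICT (by name: the statement is the Claim_ definition above) =====
theorem remove_excessive_word_repetition_py_spec : Claim_equal_remove_excessive_word_repetition_py := by
  intro words max_repetition _
  unfold Spec_remove_excessive_word_repetition_py remove_excessive_word_repetition_py
    remove_excessive_word_repetition_py_alt
  by_cases h : words = []
  · subst h; simp [pvBGo_nil]
  · rw [if_neg h]
    exact pvMain max_repetition words.length words (le_refl _)
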